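-- pv_equiv track=rewrite | github.com/Skir131/labtop | unresoloved problem.py/N-Quuen.py | dia
-- ===== SOURCE A (Python) =====
-- def dia(arr, r, c, n):
--     # 배열에서 위치의 대각선을 확인하여 1이 없을 때 True 반환
--     k = 1
--     while r + k < n and c + k < n:
--         if arr[r + k][c + k]:
--             return 0
--         k += 1
--     k = 1
--     while r - k >= 0 and c - k >= 0:
--         if arr[r - k][c - k]:
--             return 0
--         k += 1
--     k = 1
--     while r - k >= 0 and c + k < n:
--         if arr[r - k][c + k]:
--             return 0
--         k += 1
--     k = 1
--     while r + k < n and c - k >= 0: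
--         if arr[r + k][c - k]:
--             return 0
--         k += 1
--     return 1
-- ===== SOURCE B (Python) =====
-- def dia(arr, r, c, n):
--     # scan outward by distance k, probing all four diagonal directions per ring,
--     # instead of finishing each diagonal walk before starting the next
--     dirs = ((1, 1), (-1, -1), (-1, 1), (1, -1))
--     k = 1
--     while True:
--         alive = False
--         for dr, dc in dirs:
--             i, j = r + dr * k, c + dc * k
--             if (i < n if dr > 0 else i >= 0) and (j < n if dc > 0 else j >= 0):
--                 alive = True
--                 if arr[i][j]:
--                     return 0
--         if not alive:
--             return 1
--         k += 1
-- ===== Notes on version B (the rewrite author's own statement) =====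
-- stated objective: alternative
-- what changed: Replaces A's four sequential outward diagonal walks by a single ring scan over the distance k that probes all four diagonal directions at each distance and stops when no direction is still in range, visiting the same cells in a different (breadth-first) order under one loop; Pre_ admits exactly the inputs on which every cell of the four diagonal walks is a valid index, excluding inputs where A returns 0 by hitting a nonzero cell before an invalid index that B's by-distance order meets first (or where both happen to return before reaching it).
-- outside the precondition, e.g. on dia([[0], [0, 0, 0, 0], [0, 0, 0, 0], [0, 0, 9, 0]], 1, 0, 4): A returns 0, B raises IndexError; on dia([[1], [], []], -1, -1, 152): A returns 0, B returns 0
import Mathlib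
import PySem

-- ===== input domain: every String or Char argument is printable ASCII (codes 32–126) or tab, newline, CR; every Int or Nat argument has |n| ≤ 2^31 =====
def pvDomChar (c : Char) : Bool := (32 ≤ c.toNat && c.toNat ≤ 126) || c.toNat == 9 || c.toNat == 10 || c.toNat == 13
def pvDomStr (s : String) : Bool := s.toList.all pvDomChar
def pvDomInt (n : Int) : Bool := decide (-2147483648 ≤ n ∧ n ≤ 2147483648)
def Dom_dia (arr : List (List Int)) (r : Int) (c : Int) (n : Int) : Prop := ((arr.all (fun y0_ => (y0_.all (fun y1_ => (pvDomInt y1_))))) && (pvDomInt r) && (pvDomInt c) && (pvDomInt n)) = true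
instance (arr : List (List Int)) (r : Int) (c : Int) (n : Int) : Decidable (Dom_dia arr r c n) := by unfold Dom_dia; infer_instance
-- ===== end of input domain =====

-- B replaces A's four sequential outward diagonal walks by ONE ring scan over the
-- distance k that probes all four diagonal directions at each distance (objective:
-- alternative traversal order, same cost).

-- ===== PORT A =====
-- arr[i][j] with Python indexing; none = IndexError
def diaCell (arr : List (List Int)) (i j : Int) : Option Int :=
  (PySem.List.pyGet? arr i).bind (fun row => PySem.List.pyGet? row j)

-- guard of one coordinate of a walk: 'v < n' when the direction is +1, 'v >= 0' when -1
def diaBound (d v n : Int) : Bool := if d = 1 then decide (v < n) else decide (0 ≤ v)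

-- one of A's four while-loops, direction (dr, dc) ∈ {±1}²; fuel-based recursion,
-- fuel is always chosen large enough (see diaFuel).  some true = 'return 0' fired,
-- some false = loop ended normally, none = IndexError (excluded by Pre_dia).
def diaWalk (arr : List (List Int)) (r c n dr dc : Int) : Nat → Int → Option Bool
  | 0, _ => some false
  | fuel+1, k =>
    if diaBound dr (r + dr * k) n && diaBound dc (c + dc * k) n then
      match diaCell arr (r + dr * k) (c + dc * k) with
      | none => none
      | some v => if v ≠ 0 then some true else diaWalk arr r c n dr dc fuel (k + 1)
    else some false

def diaFuel (r c n : Int) : Nat := (n - r).toNat + (n - c).toNat + r.toNat + c.toNat + 2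

-- on none (Python would raise, outside Pre_dia) the port returns 0
def dia (arr : List (List Int)) (r : Int) (c : Int) (n : Int) : Int :=
  match diaWalk arr r c n 1 1 (diaFuel r c n) 1 with
  | none => 0
  | some true => 0
  | some false =>
    match diaWalk arr r c n (-1) (-1) (diaFuel r c n) 1 with
    | none => 0
    | some true => 0
    | some false =>
      match diaWalk arr r c n (-1) 1 (diaFuel r c n) 1 with
      | none => 0
      | some true => 0
      | some false =>
        match diaWalk arr r c n 1 (-1) (diaFuel r c n) 1 with
        | none => 0
        | some true => 0
        | some false => 1

-- ===== PORT B =====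
def diaDirs : List (Int × Int) := [(1, 1), (-1, -1), (-1, 1), (1, -1)]

-- B's per-coordinate range test '(i < n if dr > 0 else i >= 0)'
def diaInR (d v n : Int) : Bool := if 0 < d then decide (v < n) else decide (0 ≤ v)

-- B's inner 'for dr, dc in dirs' pass at distance k, threading the alive flag;
-- none = IndexError, some (Sum.inr ()) = 'return 0' fired, some (Sum.inl alive) = pass done
def diaRingStep (arr : List (List Int)) (r c n k : Int) :
    List (Int × Int) → Bool → Option (Bool ⊕ Unit)
  | [], alive => some (Sum.inl alive)
  | (dr, dc) :: ds, alive =>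
    if diaInR dr (r + dr * k) n && diaInR dc (c + dc * k) n then
      match (PySem.List.pyGet? arr (r + dr * k)).bind
          (fun row => PySem.List.pyGet? row (c + dc * k)) with
      | none => none
      | some v => if v ≠ 0 then some (Sum.inr ()) else diaRingStep arr r c n k ds true
    else diaRingStep arr r c n k ds alive

-- B's 'while True' loop over the distance k; fuel is always chosen large enough
def diaLoop (arr : List (List Int)) (r c n : Int) : Nat → Int → Option Int
  | 0, _ => none
  | fuel+1, k =>
    match diaRingStep arr r c n k diaDirs false with
    | none => none
    | some (Sum.inr ()) => some 0
    | some (Sum.inl alive) => if alive then diaLoop arr r c n fuel (k + 1) else some 1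

-- on none (Python would raise, outside Pre_dia) the port returns 0
def dia_alt (arr : List (List Int)) (r : Int) (c : Int) (n : Int) : Int :=
  match diaLoop arr r c n (n.natAbs + r.natAbs + c.natAbs + 2) 1 with
  | none => 0
  | some x => x

-- ===== PRECONDITION & SPEC =====
-- last step of the walk in direction d: its guard holds exactly for 1 ≤ k ≤ diaTopD
def diaTopD (r c n : Int) (d : Int × Int) : Int :=
  min (if 0 < d.1 then n - r - 1 else r) (if 0 < d.2 then n - c - 1 else c)

abbrev diaOK (arr : List (List Int)) (i j : Int) : Prop := (diaCell arr i j).isSome = true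

-- every cell of the walk in direction d is a valid index; the ≤ 2·len cap only bounds
-- the range the ∀ enumerates — it is implied by validity itself (a walk longer than
-- 2·len(arr) visits more distinct row indices than arr has valid ones), so diaValidD
-- holds exactly when every cell of the walk is valid.
def diaValidD (arr : List (List Int)) (r c n : Int) (d : Int × Int) : Prop :=
  diaTopD r c n d ≤ 2 * (arr.length : Int) ∧
  ∀ k ∈ PySem.List.pyRange 1 (diaTopD r c n d + 1) 1,
    diaOK arr (r + d.1 * k) (c + d.2 * k)

-- Pre_dia: every cell of the four diagonal walks is a valid Python index. It excludes
-- inputs on which A returns 0 by hitting a nonzero cell BEFORE an invalid index in its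
-- per-walk order, while B's by-distance order can meet the invalid index first and
-- raise (and, with it, inputs where both happen to return before the invalid index).
def Pre_dia (arr : List (List Int)) (r : Int) (c : Int) (n : Int) : Prop :=
  ∀ d ∈ ([(1, 1), (-1, -1), (-1, 1), (1, -1)] : List (Int × Int)), diaValidD arr r c n d
instance (arr : List (List Int)) (r : Int) (c : Int) (n : Int) : Decidable (Pre_dia arr r c n) := by unfold Pre_dia diaValidD; infer_instance

def pvWitness_dia : List (List Int) × Int × Int × Int := ([[0, 1], [0, 0]], 0, 0, 2)

def Spec_dia (arr : List (List Int)) (r : Int) (c : Int) (n : Int) (out : Int) : Prop := out = dia_alt arr r c n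
instance (arr : List (List Int)) (r : Int) (c : Int) (n : Int) (out : Int) : Decidable (Spec_dia arr r c n out) := by unfold Spec_dia; infer_instance

-- ===== CLAIM (what is proved, stated in full; the proofs are below) =====
def Claim_equal_dia : Prop := ∀ (arr : List (List Int)) (r : Int) (c : Int) (n : Int), Dom_dia arr r c n → Pre_dia arr r c n → Spec_dia arr r c n (dia arr r c n)

-- ===== LEMMAS AND PROOFS =====

-- the value at arr[i][j] (0 if invalid; only read under diaOK)
abbrev diaVal (arr : List (List Int)) (i j : Int) : Int := (diaCell arr i j).getD 0

-- 'some step k' ≤ k ≤ top of direction d hits a nonzero cell', as a Bool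
def diaHitFrom (arr : List (List Int)) (r c n k : Int) (d : Int × Int) : Bool :=
  (PySem.List.pyRange k (diaTopD r c n d + 1) 1).any
    (fun k' => diaVal arr (r + d.1 * k') (c + d.2 * k') != 0)

theorem diaMemDirs {d : Int × Int}
    (h : d ∈ ([(1, 1), (-1, -1), (-1, 1), (1, -1)] : List (Int × Int))) :
    (d.1 = 1 ∨ d.1 = -1) ∧ (d.2 = 1 ∨ d.2 = -1) := by
  fin_cases h <;> simp

-- A's per-step guard holds iff k is at most the walk's closed-form last step
theorem diaGuardA_iff (r c n k : Int) {d : Int × Int}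
    (h : d ∈ ([(1, 1), (-1, -1), (-1, 1), (1, -1)] : List (Int × Int))) :
    (diaBound d.1 (r + d.1 * k) n && diaBound d.2 (c + d.2 * k) n) = true ↔
      k ≤ diaTopD r c n d := by
  obtain ⟨h1, h2⟩ := diaMemDirs h
  rcases h1 with e1 | e1 <;> rcases h2 with e2 | e2 <;>
    simp [diaBound, diaTopD, e1, e2] <;> omega

-- B's per-step range test is the same condition
theorem diaGuardB_iff (r c n k : Int) {d : Int × Int}
    (h : d ∈ ([(1, 1), (-1, -1), (-1, 1), (1, -1)] : List (Int × Int))) :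
    (diaInR d.1 (r + d.1 * k) n && diaInR d.2 (c + d.2 * k) n) = true ↔
      k ≤ diaTopD r c n d := by
  obtain ⟨h1, h2⟩ := diaMemDirs h
  rcases h1 with e1 | e1 <;> rcases h2 with e2 | e2 <;>
    simp [diaInR, diaTopD, e1, e2] <;> omega

-- splitting off the first step of diaHitFrom
theorem diaHitFrom_cons (arr : List (List Int)) (r c n k : Int) (d : Int × Int) :
    diaHitFrom arr r c n k d =
      ((decide (k ≤ diaTopD r c n d) && (diaVal arr (r + d.1 * k) (c + d.2 * k) != 0)) ||
        diaHitFrom arr r c n (k + 1) d) := by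
  unfold diaHitFrom
  by_cases hk : k ≤ diaTopD r c n d
  · rw [PySem.List.pyRange_one_cons (by omega)]
    simp [hk]
  · rw [PySem.List.pyRange_one_eq_nil (by omega), PySem.List.pyRange_one_eq_nil (by omega)]
    simp [hk]

-- A's walk in direction d computes diaHitFrom, given validity of all its cells
theorem diaWalk_eq_hit (arr : List (List Int)) (r c n : Int) {d : Int × Int}
    (hd : d ∈ ([(1, 1), (-1, -1), (-1, 1), (1, -1)] : List (Int × Int)))
    (hv : ∀ k ∈ PySem.List.pyRange 1 (diaTopD r c n d + 1) 1,
      diaOK arr (r + d.1 * k) (c + d.2 * k)) :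
    ∀ (fuel : Nat) (k : Int), 1 ≤ k → (diaTopD r c n d + 1 - k).toNat ≤ fuel →
      diaWalk arr r c n d.1 d.2 fuel k = some (diaHitFrom arr r c n k d) := by
  intro fuel
  induction fuel with
  | zero =>
    intro k hk1 hfuel
    unfold diaHitFrom
    rw [PySem.List.pyRange_one_eq_nil (by omega)]
    rfl
  | succ fuel ih =>
    intro k hk1 hfuel
    rw [diaHitFrom_cons]
    by_cases hk : k ≤ diaTopD r c n d
    · have hg := (diaGuardA_iff r c n k hd).mpr hk
      have hOK : diaOK arr (r + d.1 * k) (c + d.2 * k) :=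
        hv k (by rw [PySem.List.mem_pyRange_one]; omega)
      obtain ⟨v, hcell⟩ := Option.isSome_iff_exists.mp hOK
      rw [diaWalk, hg]
      simp only [if_true]
      rw [hcell]
      dsimp only
      have hval : diaVal arr (r + d.1 * k) (c + d.2 * k) = v := by
        simp [diaVal, hcell]
      by_cases hvz : v = 0
      · rw [if_neg (by simp [hvz])]
        rw [ih (k + 1) (by omega) (by omega)]
        rw [hval, hvz]
        simp
      · rw [if_pos hvz]
        rw [hval]
        simp [hvz, hk]
    · have hg : (diaBound d.1 (r + d.1 * k) n && diaBound d.2 (c + d.2 * k) n) = false :=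
        Bool.eq_false_iff.mpr (fun h => hk ((diaGuardA_iff r c n k hd).mp h))
      rw [diaWalk, hg]
      unfold diaHitFrom
      rw [PySem.List.pyRange_one_eq_nil (by omega)]
      simp [hk]

-- B's inner pass: first hit at distance k wins, else the alive flag records whether
-- any direction of ds is still in range (validity of the probed cells assumed)
theorem diaRingStep_eq (arr : List (List Int)) (r c n k : Int) (hk1 : 1 ≤ k)
    (hv : ∀ d ∈ ([(1, 1), (-1, -1), (-1, 1), (1, -1)] : List (Int × Int)),
      ∀ k' ∈ PySem.List.pyRange 1 (diaTopD r c n d + 1) 1,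
        diaOK arr (r + d.1 * k') (c + d.2 * k')) :
    ∀ (ds : List (Int × Int)),
      (∀ d ∈ ds, d ∈ ([(1, 1), (-1, -1), (-1, 1), (1, -1)] : List (Int × Int))) →
      ∀ (alive : Bool),
      diaRingStep arr r c n k ds alive =
        (if ds.any (fun d => decide (k ≤ diaTopD r c n d) &&
              (diaVal arr (r + d.1 * k) (c + d.2 * k) != 0)) then some (Sum.inr ())
         else some (Sum.inl (alive ||
           ds.any (fun d => decide (k ≤ diaTopD r c n d))))) := by
  intro ds
  induction ds with
  | nil => intro _ alive; simp [diaRingStep]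
  | cons d ds ih =>
    intro hsub alive
    have hd : d ∈ ([(1, 1), (-1, -1), (-1, 1), (1, -1)] : List (Int × Int)) :=
      hsub d (List.mem_cons_self)
    have hsub' : ∀ d' ∈ ds, d' ∈ ([(1, 1), (-1, -1), (-1, 1), (1, -1)] : List (Int × Int)) :=
      fun d' h' => hsub d' (List.mem_cons_of_mem d h')
    obtain ⟨dr, dc⟩ := d
    by_cases hk : k ≤ diaTopD r c n (dr, dc)
    · have hg := (diaGuardB_iff r c n k hd).mpr hk
      have hOK : diaOK arr (r + dr * k) (c + dc * k) :=
        hv (dr, dc) hd k (by rw [PySem.List.mem_pyRange_one]; omega)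
      obtain ⟨v, hcell⟩ := Option.isSome_iff_exists.mp hOK
      have hval : diaVal arr (r + dr * k) (c + dc * k) = v := by simp [diaVal, hcell]
      rw [diaRingStep, hg]
      simp only [if_true]
      rw [show (PySem.List.pyGet? arr (r + dr * k)).bind
          (fun row => PySem.List.pyGet? row (c + dc * k)) = some v from hcell]
      dsimp only
      by_cases hvz : v = 0
      · rw [if_neg (by simp [hvz]), ih hsub' true]
        simp only [List.any_cons]
        rw [hval, hvz]
        congr 1 <;> simp [hk]
      · rw [if_pos hvz]
        simp only [List.any_cons]
        rw [hval, decide_eq_true hk]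
        simp [hvz]
    · have hg : (diaInR dr (r + dr * k) n && diaInR dc (c + dc * k) n) = false :=
        Bool.eq_false_iff.mpr (fun h => hk ((diaGuardB_iff r c n k hd).mp h))
      rw [diaRingStep, hg]
      simp only [Bool.false_eq_true, if_false]
      rw [ih hsub' alive]
      simp only [List.any_cons]
      rw [decide_eq_false hk]
      congr 1

-- B's loop computes 'any direction hits at some distance ≥ k', given validity
set_option maxHeartbeats 1000000 in
theorem diaLoop_eq (arr : List (List Int)) (r c n : Int)
    (hv : ∀ d ∈ ([(1, 1), (-1, -1), (-1, 1), (1, -1)] : List (Int × Int)),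
      ∀ k' ∈ PySem.List.pyRange 1 (diaTopD r c n d + 1) 1,
        diaOK arr (r + d.1 * k') (c + d.2 * k')) :
    ∀ (fuel : Nat) (k : Int), 1 ≤ k →
      (∀ d ∈ ([(1, 1), (-1, -1), (-1, 1), (1, -1)] : List (Int × Int)),
        (diaTopD r c n d + 2 - k).toNat < fuel) →
      diaLoop arr r c n fuel k =
        some (if ([(1, 1), (-1, -1), (-1, 1), (1, -1)] : List (Int × Int)).any
            (diaHitFrom arr r c n k) then 0 else 1) := by
  intro fuel
  induction fuel with
  | zero =>
    intro k _ hfuel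
    exact absurd (hfuel (1, 1) (by simp)) (by omega)
  | succ fuel ih =>
    intro k hk1 hfuel
    rw [diaLoop]
    rw [diaRingStep_eq arr r c n k hk1 hv diaDirs (by intro d h; exact h) false]
    by_cases hhit : (diaDirs.any (fun d => decide (k ≤ diaTopD r c n d) &&
        (diaVal arr (r + d.1 * k) (c + d.2 * k) != 0))) = true
    · rw [if_pos hhit]
      have : (([(1, 1), (-1, -1), (-1, 1), (1, -1)] : List (Int × Int)).any
          (diaHitFrom arr r c n k)) = true := by
        rw [List.any_eq_true] at hhit ⊢
        obtain ⟨d, hd, hdd⟩ := hhit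
        exact ⟨d, hd, by rw [diaHitFrom_cons, hdd]; simp⟩
      rw [this]
      simp
    · rw [if_neg hhit]
      simp only [Bool.false_or]
      by_cases halive : (diaDirs.any (fun d => decide (k ≤ diaTopD r c n d))) = true
      · rw [if_pos halive]
        have hkM : k ≤ diaTopD r c n (1,1) ∨ k ≤ diaTopD r c n (-1,-1) ∨
            k ≤ diaTopD r c n (-1,1) ∨ k ≤ diaTopD r c n (1,-1) := by
          rw [List.any_eq_true] at halive
          obtain ⟨d, hd, hdd⟩ := halive
          simp only [diaDirs, List.mem_cons, List.not_mem_nil, or_false] at hd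
          rcases hd with rfl | rfl | rfl | rfl <;> simp_all
        rw [ih (k + 1) (by omega) ?_]
        · congr 1
          have hsplit : ∀ d ∈ ([(1, 1), (-1, -1), (-1, 1), (1, -1)] : List (Int × Int)),
              diaHitFrom arr r c n k d = diaHitFrom arr r c n (k + 1) d := by
            intro d hd
            rw [diaHitFrom_cons]
            rw [Bool.not_eq_true, List.any_eq_false] at hhit
            have hx := Bool.not_eq_true _ ▸ hhit d hd
            rw [hx]
            simp
          simp only [List.any_cons, List.any_nil, Bool.or_false]
          rw [hsplit (1,1) (by simp), hsplit (-1,-1) (by simp),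
              hsplit (-1,1) (by simp), hsplit (1,-1) (by simp)]
        · intro d hd
          simp only [List.mem_cons, List.not_mem_nil, or_false] at hd
          have h2 := hfuel (1,1) (by simp)
          have h3 := hfuel (-1,-1) (by simp)
          have h4 := hfuel (-1,1) (by simp)
          have h5 := hfuel (1,-1) (by simp)
          rcases hd with rfl | rfl | rfl | rfl <;> rcases hkM with hm | hm | hm | hm <;> omega
      · rw [if_neg halive]
        have : (([(1, 1), (-1, -1), (-1, 1), (1, -1)] : List (Int × Int)).any
            (diaHitFrom arr r c n k)) = false := by
          rw [Bool.not_eq_true, List.any_eq_false] at halive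
          rw [List.any_eq_false]
          intro d hd
          have := halive d hd
          unfold diaHitFrom
          rw [PySem.List.pyRange_one_eq_nil (by simp at this; omega)]
          simp
        rw [this]
        simp

-- tops are bounded by the fuel dia_alt supplies
theorem diaTop_lt_fuel (r c n : Int)
    (d : Int × Int) (hd : d ∈ ([(1, 1), (-1, -1), (-1, 1), (1, -1)] : List (Int × Int))) :
    (diaTopD r c n d + 2 - 1).toNat < n.natAbs + r.natAbs + c.natAbs + 2 := by
  obtain ⟨h1, h2⟩ := diaMemDirs hd
  rcases h1 with e1 | e1 <;> rcases h2 with e2 | e2 <;>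
    simp [diaTopD, e1, e2] <;> omega

theorem dia_eq_alt (arr : List (List Int)) (r c n : Int) (hPre : Pre_dia arr r c n) :
    dia arr r c n = dia_alt arr r c n := by
  unfold Pre_dia diaValidD at hPre
  have hv : ∀ d ∈ ([(1, 1), (-1, -1), (-1, 1), (1, -1)] : List (Int × Int)),
      ∀ k' ∈ PySem.List.pyRange 1 (diaTopD r c n d + 1) 1,
        diaOK arr (r + d.1 * k') (c + d.2 * k') :=
    fun d hd => (hPre d hd).2
  have hfuelA : ∀ d ∈ ([(1, 1), (-1, -1), (-1, 1), (1, -1)] : List (Int × Int)),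
      (diaTopD r c n d + 1 - 1).toNat ≤ diaFuel r c n := by
    intro d hd
    obtain ⟨h1, h2⟩ := diaMemDirs hd
    unfold diaFuel
    rcases h1 with e1 | e1 <;> rcases h2 with e2 | e2 <;>
      simp [diaTopD, e1, e2] <;> omega
  have e1 := diaWalk_eq_hit arr r c n (d := (1,1)) (by simp) (hv _ (by simp))
    (diaFuel r c n) 1 (by omega) (hfuelA (1,1) (by simp))
  have e2 := diaWalk_eq_hit arr r c n (d := (-1,-1)) (by simp) (hv _ (by simp))
    (diaFuel r c n) 1 (by omega) (hfuelA (-1,-1) (by simp))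
  have e3 := diaWalk_eq_hit arr r c n (d := (-1,1)) (by simp) (hv _ (by simp))
    (diaFuel r c n) 1 (by omega) (hfuelA (-1,1) (by simp))
  have e4 := diaWalk_eq_hit arr r c n (d := (1,-1)) (by simp) (hv _ (by simp))
    (diaFuel r c n) 1 (by omega) (hfuelA (1,-1) (by simp))
  have eB := diaLoop_eq arr r c n hv (n.natAbs + r.natAbs + c.natAbs + 2) 1 (by omega)
    (fun d hd => diaTop_lt_fuel r c n d hd)
  unfold dia dia_alt
  rw [e1, e2, e3, e4, eB]
  simp only [List.any_cons, List.any_nil, Bool.or_false]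
  cases h1 : diaHitFrom arr r c n 1 (1,1) <;>
    cases h2 : diaHitFrom arr r c n 1 (-1,-1) <;>
      cases h3 : diaHitFrom arr r c n 1 (-1,1) <;>
        cases h4 : diaHitFrom arr r c n 1 (1,-1) <;> simp

-- ===== VERDICT (by name: the statement is the Claim_ definition above) =====
theorem dia_spec : Claim_equal_dia := by
  intro arr r c n _hDom hPre
  unfold Spec_dia
  exact dia_eq_alt arr r c n hPre
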